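-- pv_equiv track=rewrite | github.com/GRETSI-2025/GRETSI25_Label-Argent_Raining-Words_Les-modeles-dASR-peuvent-ils-retranscrire-les-sous-genres-Metal | lib/audio.py | normalize_lyrics
-- ===== SOURCE A (Python) =====
-- def normalize_lyrics ( lyrics: str
--                      ) ->      str:
--
--     """
--         Function to normalize lyrics.
--         In:
--             * lyrics: The lyrics to normalize.
--         Out:
--             * The normalized lyrics.
--     """
--
--     # Remove capitals and special characters
--     lyrics = lyrics.lower()
--     lyrics = "".join([char for char in lyrics if char.isalnum() or char.isspace() or char in ["'", "-"]])
--
--     # Remove extra spaces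
--     words = lyrics.split()
--
--     # Remove words too long to be actual words
--     words = [word for word in words if len(word) < 25]
--
--     # Remove duplicate words
--     lyrics = [words[i] for i in range(len(words)) if i == 0 or words[i] != words[i-1]]
--     lyrics = " ".join(lyrics)
--     return lyrics
-- ===== SOURCE B (Python) =====
-- def _flush(out, cur, prev):
--     """End the current word: keep it if short and not a repeat of the last short word."""
--     if cur:
--         w = "".join(cur)
--         if len(w) < 25:
--             if w != prev:
--                 out.append(w)
--             prev = w
--     return prev
--
--
-- def normalize_lyrics(lyrics):
--     # Single character-level scan: no intermediate cleaned string, no split,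
--     # no staged word lists -- words are assembled and judged on the fly.
--     out, cur, prev = [], [], None
--     for ch in lyrics:
--         c = ch.lower()
--         if c.isspace():
--             prev = _flush(out, cur, prev)
--             cur = []
--         elif c.isalnum() or c in "'-":
--             cur.append(c)
--     _flush(out, cur, prev)
--     return " ".join(out)
-- ===== Notes on version B (the rewrite author's own statement) =====
-- stated objective: alternative
-- what changed: A's four staged passes (build a cleaned string, split it into a word list, length-filter that list, then a second index-based comprehension deduplicating consecutive words) are replaced by one character-level scan that assembles each word in a buffer and decides keep/drop at each word boundary on the fly, never materialising the cleaned string or any intermediate word list.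
import Mathlib
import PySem

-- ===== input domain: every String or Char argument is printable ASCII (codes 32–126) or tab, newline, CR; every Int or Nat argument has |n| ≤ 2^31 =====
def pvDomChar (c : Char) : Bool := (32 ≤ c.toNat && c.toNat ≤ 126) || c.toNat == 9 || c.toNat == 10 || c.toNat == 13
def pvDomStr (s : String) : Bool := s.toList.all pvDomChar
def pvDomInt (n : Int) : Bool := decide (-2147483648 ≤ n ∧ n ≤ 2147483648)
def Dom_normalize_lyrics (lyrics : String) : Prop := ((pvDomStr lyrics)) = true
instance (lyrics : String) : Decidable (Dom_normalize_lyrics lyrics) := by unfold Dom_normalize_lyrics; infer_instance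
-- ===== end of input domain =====

-- B replaces A's staged pipeline (clean string, split, length-filter pass, index-based dedup pass)
-- with ONE character-level scan that assembles, judges and emits words on the fly (alternative decomposition; same cost).

-- ===== PORT A =====
-- char keep-test: char.isalnum() or char.isspace() or char in ["'", "-"]
def pvKeepCharA (c : Char) : Bool :=
  PySem.Chars.isalnum c || PySem.Chars.isspace c || ['\'', '-'].contains c

def normalize_lyrics (lyrics : String) : String :=
  let cleaned : List Char := (PySem.Chars.lower lyrics.toList).filter pvKeepCharA
  let words0 : List (List Char) := PySem.Chars.split₀ cleaned
  let words : List (List Char) := words0.filter (fun w => w.length < 25)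
  -- words[i] / words[i-1]: every index i produced by range(len(words)) that reaches the second
  -- disjunct / the map is in range, so pyGetD with a dummy default is exact here
  let lyr : List (List Char) :=
    ((PySem.List.pyRange 0 words.length 1).filter
        (fun i => i == 0 || !(PySem.List.pyGetD words i [] == PySem.List.pyGetD words (i - 1) []))).map
      (fun i => PySem.List.pyGetD words i [])
  String.ofList (PySem.Chars.join [' '] lyr)

-- ===== PORT B =====
-- _flush(out, cur, prev): end the current word; returns (new out, new prev) (out is mutated in Python,
-- returned functionally here; cur is reset at the call sites, as in Source B)
def pvFlushB (out : List (List Char)) (cur : List Char) (prev : Option (List Char)) :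
    List (List Char) × Option (List Char) :=
  if cur ≠ [] then
    if cur.length < 25 then
      ((if some cur ≠ prev then out ++ [cur] else out), some cur)
    else (out, prev)
  else (out, prev)

-- loop body of the single character scan; state = (out, cur, prev)
def pvStepB (st : List (List Char) × List Char × Option (List Char)) (ch : Char) :
    List (List Char) × List Char × Option (List Char) :=
  let c := PySem.Chars.lowerChar ch
  if PySem.Chars.isspace c then
    ((pvFlushB st.1 st.2.1 st.2.2).1, [], (pvFlushB st.1 st.2.1 st.2.2).2)
  else if PySem.Chars.isalnum c || ['\'', '-'].contains c then
    (st.1, st.2.1 ++ [c], st.2.2)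
  else st

def normalize_lyrics_alt (lyrics : String) : String :=
  let st := lyrics.toList.foldl pvStepB ([], [], none)
  String.ofList (PySem.Chars.join [' '] (pvFlushB st.1 st.2.1 st.2.2).1)

-- ===== PRECONDITION & SPEC =====
def Spec_normalize_lyrics (lyrics : String) (out : String) : Prop := out = normalize_lyrics_alt lyrics
instance (lyrics : String) (out : String) : Decidable (Spec_normalize_lyrics lyrics out) := by unfold Spec_normalize_lyrics; infer_instance

-- ===== CLAIM =====
def Claim_equal_normalize_lyrics : Prop := ∀ (lyrics : String), Dom_normalize_lyrics lyrics → Spec_normalize_lyrics lyrics (normalize_lyrics lyrics)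

-- ===== LEMMAS AND PROOFS =====

-- reference consecutive-dedup with an optional previous word
def pvDedupGo (prev : Option (List Char)) : List (List Char) → List (List Char)
  | [] => []
  | w :: ws => (if some w ≠ prev then [w] else []) ++ pvDedupGo (some w) ws

-- length filter and consecutive dedup fused into one word-level pass
def pvDF (prev : Option (List Char)) : List (List Char) → List (List Char)
  | [] => []
  | w :: ws =>
      if w.length < 25 then (if some w ≠ prev then [w] else []) ++ pvDF (some w) ws
      else pvDF prev ws

-- A's dedup comprehension over the tail indices, with the previous element made explicit
theorem pvNatform_aux (xs : List (List Char)) :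
    ∀ x : List Char,
      ((List.range xs.length).filter
          (fun k => !(xs.getD k [] == (x :: xs).getD k []))).map (fun k => xs.getD k [])
        = pvDedupGo (some x) xs := by
  induction xs with
  | nil => intro x; simp [pvDedupGo]
  | cons y ys ih =>
      intro x
      rw [List.length_cons, List.range_succ_eq_map]
      rw [List.filter_cons]
      by_cases hxy : y = x
      · subst hxy
        simp only [List.getD_cons_zero, beq_self_eq_true, Bool.not_true, Bool.false_eq_true,
          if_false, List.map_map, List.filter_map, Function.comp_def, Nat.succ_eq_add_one,
          List.getD_cons_succ, pvDedupGo]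
        rw [ih y]
        simp
      · have hb : (y == x) = false := beq_false_of_ne hxy
        simp only [List.getD_cons_zero, hb, Bool.not_false, if_true, List.map_cons, List.map_map,
          List.filter_map, Function.comp_def, Nat.succ_eq_add_one, List.getD_cons_succ, pvDedupGo]
        rw [ih y]
        simp [hxy]

-- A's dedup comprehension, Nat-index form
theorem pvNatform (vs : List (List Char)) :
    ((List.range vs.length).filter
        (fun k => (k == 0) || !(vs.getD k [] == vs.getD (k-1) []))).map (fun k => vs.getD k [])
      = pvDedupGo none vs := by
  cases vs with
  | nil => simp [pvDedupGo]
  | cons x xs =>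
      rw [List.length_cons, List.range_succ_eq_map, List.filter_cons]
      simp only [beq_self_eq_true, Bool.true_or, if_true, List.map_cons, List.getD_cons_zero,
        List.filter_map, List.map_map, Function.comp_def, Nat.succ_eq_add_one,
        List.getD_cons_succ, Nat.add_sub_cancel]
      have : (fun k => (k + 1 == 0) || !(xs.getD k [] == (x :: xs).getD k []))
           = (fun k => !(xs.getD k [] == (x :: xs).getD k [])) := by
        funext k; simp
      rw [this, pvNatform_aux xs x]
      simp [pvDedupGo]

-- A's dedup comprehension, exactly as ported (Int indices via pyRange/pyGetD)
theorem pvIntform (vs : List (List Char)) :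
    ((PySem.List.pyRange 0 vs.length 1).filter
        (fun i => i == 0 || !(PySem.List.pyGetD vs i [] == PySem.List.pyGetD vs (i - 1) []))).map
      (fun i => PySem.List.pyGetD vs i [])
      = pvDedupGo none vs := by
  rw [PySem.List.pyRange_one]
  have hn : ((vs.length : Int) - 0).toNat = vs.length := by simp
  rw [hn, List.filter_map, List.map_map]
  rw [show ((fun i : Int => i == 0 || !(PySem.List.pyGetD vs i [] == PySem.List.pyGetD vs (i - 1) [])) ∘ (fun k : Nat => (0:Int) + k))
        = (fun k : Nat => ((0:Int) + k == 0 || !(PySem.List.pyGetD vs ((0:Int)+k) [] == PySem.List.pyGetD vs (((0:Int)+k) - 1) []))) from rfl]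
  rw [← pvNatform vs]
  rw [List.filter_congr, List.map_congr_left]
  · intro k hk
    simp [PySem.List.pyGetD_natCast]
  · intro k hk
    by_cases h0 : k = 0
    · subst h0; simp
    · have h2 : (k:Int) - 1 = ((k-1 : Nat) : Int) := by omega
      have ha : ((k:Int) == 0) = false := by simpa using h0
      have hb : (k == 0) = false := by simpa using h0
      simp only [zero_add, h2, PySem.List.pyGetD_natCast, ha, hb]

-- dedup of the length-filtered list = the fused word-level pass
theorem pvDF_eq (ws : List (List Char)) :
    ∀ prev, pvDedupGo prev (ws.filter (fun w => w.length < 25)) = pvDF prev ws := by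
  induction ws with
  | nil => intro prev; simp [pvDedupGo, pvDF]
  | cons w ws ih =>
      intro prev
      by_cases h : w.length < 25
      · simp only [List.filter_cons, h, decide_true, if_true, pvDedupGo, pvDF, ih]
      · simp only [List.filter_cons, h, decide_false, Bool.false_eq_true, if_false, pvDF, ih]

-- equation lemmas for PySem.Chars.split₀.go (definitional; used instead of unfolding go)
theorem pvGoNil (cur : List Char) (acc : List (List Char)) :
    PySem.Chars.split₀.go [] cur acc
      = if cur.isEmpty then acc.reverse else (cur.reverse :: acc).reverse := rfl

theorem pvGoCons (c : Char) (rest cur : List Char) (acc : List (List Char)) :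
    PySem.Chars.split₀.go (c :: rest) cur acc
      = if PySem.Chars.isspace c then
          (if cur.isEmpty then PySem.Chars.split₀.go rest [] acc
           else PySem.Chars.split₀.go rest [] (cur.reverse :: acc))
        else PySem.Chars.split₀.go rest (c :: cur) acc := rfl

-- split₀.go's accumulator prepends (reversed) to the final result
theorem pvGoAcc (s : List Char) :
    ∀ cur acc, PySem.Chars.split₀.go s cur acc = acc.reverse ++ PySem.Chars.split₀.go s cur [] := by
  induction s with
  | nil => intro cur acc; rw [pvGoNil, pvGoNil]; by_cases h : cur.isEmpty <;> simp [h]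
  | cons c rest ih =>
      intro cur acc
      rw [pvGoCons, pvGoCons]
      by_cases hs : PySem.Chars.isspace c
      · simp only [hs, if_true]
        by_cases hc : cur.isEmpty
        · simp only [hc, if_true]; exact ih [] acc
        · simp only [hc, Bool.false_eq_true, if_false]
          rw [ih [] (cur.reverse :: acc), ih [] (cur.reverse :: [])]
          simp
      · simp only [hs, Bool.false_eq_true, if_false]
        exact ih (c :: cur) acc

-- the B scan over cs, started in any state, equals the fused pass over split₀ of the cleaned suffix
theorem pvMain (cs : List Char) :
    ∀ (out : List (List Char)) (cur : List Char) (prev : Option (List Char)),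
      (pvFlushB (cs.foldl pvStepB (out, cur, prev)).1 (cs.foldl pvStepB (out, cur, prev)).2.1
          (cs.foldl pvStepB (out, cur, prev)).2.2).1
        = out ++ pvDF prev
            (PySem.Chars.split₀.go ((cs.map PySem.Chars.lowerChar).filter pvKeepCharA) cur.reverse []) := by
  induction cs with
  | nil =>
      intro out cur prev
      cases cur with
      | nil => simp [pvFlushB, pvGoNil, pvDF]
      | cons x xs =>
          have hne : (x :: xs) ≠ ([] : List Char) := by simp
          rw [List.foldl_nil, List.map_nil, List.filter_nil, pvGoNil]
          simp only [List.reverse_nil, List.reverse_cons, List.nil_append, List.reverse_reverse,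
            List.reverse_append, List.singleton_append, pvFlushB, hne, if_true, ne_eq,
            not_false_iff]
          split_ifs with h1 h2 <;> simp_all [pvDF]
  | cons c rest ih =>
      intro out cur prev
      rw [List.foldl_cons, List.map_cons, List.filter_cons]
      set c' := PySem.Chars.lowerChar c with hc'
      by_cases hs : PySem.Chars.isspace c'
      · have hkeep : pvKeepCharA c' = true := by
          unfold pvKeepCharA
          exact Bool.or_eq_true _ _ |>.mpr (Or.inl (Bool.or_eq_true _ _ |>.mpr (Or.inr hs)))
        have hstep : pvStepB (out, cur, prev) c
            = ((pvFlushB out cur prev).1, [], (pvFlushB out cur prev).2) := by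
          unfold pvStepB
          rw [← hc']
          simp only [hs, if_true]
        rw [hstep, ih, hkeep]
        simp only [if_true]
        cases cur with
        | nil =>
            rw [pvGoCons]
            simp [hs, pvFlushB]
        | cons x xs =>
            have hne : (x :: xs) ≠ ([] : List Char) := by simp
            have hrev : ((x :: xs).reverse).isEmpty = false := by simp
            rw [pvGoCons]
            simp only [hs, if_true, hrev, Bool.false_eq_true, if_false, List.reverse_reverse]
            rw [pvGoAcc _ [] ((x :: xs) :: [])]
            simp only [List.reverse_cons, List.reverse_nil, List.nil_append, List.singleton_append,
              pvDF, pvFlushB, hne, if_true, ne_eq, not_false_iff]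
            split_ifs with h1 h2 <;> simp_all
      · have hs' : PySem.Chars.isspace c' = false := by
          revert hs; cases PySem.Chars.isspace c' <;> simp
        by_cases hw : PySem.Chars.isalnum c' || ['\'', '-'].contains c'
        · have hkeep : pvKeepCharA c' = true := by
            unfold pvKeepCharA
            rcases Bool.or_eq_true _ _ |>.mp hw with h | h
            · exact Bool.or_eq_true _ _ |>.mpr (Or.inl (Bool.or_eq_true _ _ |>.mpr (Or.inl h)))
            · exact Bool.or_eq_true _ _ |>.mpr (Or.inr h)
          have hstep : pvStepB (out, cur, prev) c = (out, cur ++ [c'], prev) := by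
            unfold pvStepB
            rw [← hc']
            simp only [hs', Bool.false_eq_true, if_false, hw, if_true]
          rw [hstep, ih, hkeep]
          simp only [if_true]
          rw [pvGoCons]
          simp only [hs', Bool.false_eq_true, if_false, List.reverse_append,
            List.reverse_singleton, List.singleton_append]
        · have hwf : (PySem.Chars.isalnum c' || ['\'', '-'].contains c') = false := by
            revert hw; cases (PySem.Chars.isalnum c' || ['\'', '-'].contains c') <;> simp
          have hw1 : PySem.Chars.isalnum c' = false := by
            revert hwf; cases PySem.Chars.isalnum c' <;> simp
          have hw2 : (['\'', '-'].contains c') = false := by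
            revert hwf; cases (['\'', '-'].contains c') <;> simp
          have hkeep : pvKeepCharA c' = false := by
            unfold pvKeepCharA
            rw [hw1, hs', hw2]; rfl
          have hstep : pvStepB (out, cur, prev) c = (out, cur, prev) := by
            unfold pvStepB
            rw [← hc']
            simp only [hs', Bool.false_eq_true, if_false, hwf]
          rw [hstep, ih, hkeep]
          simp

theorem pvPorts_eq (lyrics : String) : normalize_lyrics lyrics = normalize_lyrics_alt lyrics := by
  simp only [normalize_lyrics, normalize_lyrics_alt]
  rw [pvIntform, pvDF_eq, pvMain]
  rfl

-- ===== VERDICT =====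
theorem normalize_lyrics_spec : Claim_equal_normalize_lyrics := by
  intro lyrics _
  unfold Spec_normalize_lyrics
  exact pvPorts_eq lyrics
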